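-- pv_equiv track=rewrite | github.com/alberto64/re_disassembler | disasm_example.py | parseXimm
-- ===== SOURCE A (Python) =====
-- class InstructionDefinitonError(Exception):
--
--     def __init__(self, value):
--         self.value = value
--
--     def __str__(self):
--         return(repr(self.value))
--
-- def parseXimm(X, counter, b):
--     immidiate_bytes = ''
--     immidiate = ''
--     byte_count = X // 8
--     for x in range(0, byte_count):
--         if counter >= len(b):
--             raise InstructionDefinitonError("Ran out of bytes to continue opcode instruction")
--         immidiate_bytes += "%02x" % b[counter]
--         immidiate = "%02x" % b[counter] + immidiate
--         counter += 1 # Advance counter by immidiate size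
--     return immidiate_bytes, immidiate, counter
-- ===== SOURCE B (Python) =====
-- class InstructionDefinitonError(Exception):
--
--     def __init__(self, value):
--         self.value = value
--
--     def __str__(self):
--         return(repr(self.value))
--
-- def parseXimm(X, counter, b):
--     byte_count = max(X // 8, 0)
--     if byte_count > 0 and counter + byte_count > len(b):
--         raise InstructionDefinitonError("Ran out of bytes to continue opcode instruction")
--     chunk = [b[counter + j] for j in range(byte_count)]
--     immidiate_bytes = ''.join("%02x" % x for x in chunk)
--     immidiate = ''.join("%02x" % x for x in reversed(chunk))
--     return immidiate_bytes, immidiate, counter + byte_count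
-- ===== Notes on version B (the rewrite author's own statement) =====
-- stated objective: simpler
-- what changed: Replaces the per-iteration bounds guard and two string-concatenation accumulators (including a quadratic prepend) with a single upfront bounds check, one indexed chunk extraction, and two joins (forward and reversed) over that chunk.
import Mathlib
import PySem

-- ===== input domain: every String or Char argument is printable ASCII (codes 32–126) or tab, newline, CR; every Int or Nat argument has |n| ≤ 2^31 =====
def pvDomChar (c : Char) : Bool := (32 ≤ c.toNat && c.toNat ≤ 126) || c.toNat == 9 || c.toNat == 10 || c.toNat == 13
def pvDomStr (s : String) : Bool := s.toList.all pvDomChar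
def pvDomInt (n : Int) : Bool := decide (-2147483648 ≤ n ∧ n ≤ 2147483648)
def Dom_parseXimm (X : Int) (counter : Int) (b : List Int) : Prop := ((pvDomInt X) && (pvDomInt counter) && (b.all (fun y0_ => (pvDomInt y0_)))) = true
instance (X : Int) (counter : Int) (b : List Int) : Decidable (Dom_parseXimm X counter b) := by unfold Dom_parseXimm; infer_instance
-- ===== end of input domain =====

-- B replaces A's per-iteration bounds guard and prepend/append string accumulation with one
-- upfront bounds check, one chunk extraction, and two joins over the chunk (objective: simpler).

-- ===== PORT A =====
-- hand-written, exact port of Python's "%02x" % v (lowercase hex, zero-pad to width 2,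
-- '-' sign in front for negative v; padding counts the sign, so negatives never pad at width 2)
def hexDigitChar (n : Nat) : Char := if n < 10 then Char.ofNat (48 + n) else Char.ofNat (87 + n)

def hexChars : Nat → List Char
  | 0 => []
  | n + 1 => hexChars ((n + 1) / 16) ++ [hexDigitChar ((n + 1) % 16)]
decreasing_by exact Nat.div_lt_self (Nat.succ_pos n) (by omega)

def fmt02x (v : Int) : String :=
  if v < 0 then String.ofList ('-' :: hexChars v.natAbs)
  else if v = 0 then "00"
  else if v < 16 then String.ofList ('0' :: hexChars v.toNat)
  else String.ofList (hexChars v.toNat)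

-- the for-loop of A; `none` = the raised InstructionDefinitonError / IndexError
def parseXimmLoopA (b : List Int) : Nat → Int → String → String → Option (String × String × Int)
  | 0, counter, ib, im => some (ib, im, counter)
  | n + 1, counter, ib, im =>
    if PySem.List.len b ≤ counter then none
    else
      match PySem.List.pyGet? b counter with
      | none => none
      | some v => parseXimmLoopA b n (counter + 1) (ib ++ fmt02x v) (fmt02x v ++ im)

def parseXimm (X : Int) (counter : Int) (b : List Int) : String × String × Int :=
  (parseXimmLoopA b (PySem.Int.floordiv X 8).toNat counter "" "").getD ("", "", counter)

-- ===== PORT B =====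
def parseXimm_alt (X : Int) (counter : Int) (b : List Int) : String × String × Int :=
  let byteCount : Int := max (PySem.Int.floordiv X 8) 0
  let chunk : List Int :=
    (List.range byteCount.toNat).map (fun (j : Nat) => (PySem.List.pyGet? b (counter + (j : Int))).getD 0)
  (PySem.Str.join "" (chunk.map fmt02x),
   PySem.Str.join "" (chunk.reverse.map fmt02x),
   counter + byteCount)

-- ===== PRECONDITION & SPEC =====
-- Pre_ excludes exactly the inputs on which A raises: byte_count = X//8 positive bytes are
-- demanded but the window [counter, counter+byte_count) is not inside the list (A raises
-- InstructionDefinitonError, or IndexError for counter < -len(b)).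
def Pre_parseXimm (X : Int) (counter : Int) (b : List Int) : Prop :=
  PySem.Int.floordiv X 8 ≤ 0 ∨
    (-(b.length : Int) ≤ counter ∧ counter + PySem.Int.floordiv X 8 ≤ (b.length : Int))
instance (X : Int) (counter : Int) (b : List Int) : Decidable (Pre_parseXimm X counter b) := by
  unfold Pre_parseXimm; infer_instance

def pvWitness_parseXimm : Int × Int × List Int := (16, 1, [10, 255, 3])

def Spec_parseXimm (X : Int) (counter : Int) (b : List Int) (out : String × String × Int) : Prop := out = parseXimm_alt X counter b
instance (X : Int) (counter : Int) (b : List Int) (out : String × String × Int) : Decidable (Spec_parseXimm X counter b out) := by unfold Spec_parseXimm; infer_instance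

-- ===== CLAIM (what is proved, stated in full; the proofs are below) =====
def Claim_equal_parseXimm : Prop := ∀ (X : Int) (counter : Int) (b : List Int), Dom_parseXimm X counter b → Pre_parseXimm X counter b → Spec_parseXimm X counter b (parseXimm X counter b)

-- ===== LEMMAS AND PROOFS =====

-- ''.join over List Char is flatten
lemma chars_join_nil_eq_flatten (l : List (List Char)) : PySem.Chars.join [] l = l.flatten := by
  induction l with
  | nil => rfl
  | cons a t ih => cases t <;> simp_all [PySem.Chars.join, List.intercalate, List.intersperse]

lemma str_join_nil (l : List String) :
    PySem.Str.join "" l = String.ofList ((l.map String.toList).flatten) := by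
  simp [PySem.Str.join, chars_join_nil_eq_flatten]

-- chunk of B restated structurally
lemma chunk_succ (b : List Int) (c : Int) (n : Nat) :
    (List.range (n + 1)).map (fun (j : Nat) => (PySem.List.pyGet? b (c + (j : Int))).getD 0) =
      (PySem.List.pyGet? b c).getD 0 ::
        (List.range n).map (fun (j : Nat) => (PySem.List.pyGet? b ((c + 1) + (j : Int))).getD 0) := by
  rw [List.range_succ_eq_map]
  simp only [List.map_cons, List.map_map, Nat.cast_zero, add_zero]
  congr 1
  apply List.map_congr_left
  intro j _
  simp only [Function.comp]
  congr 2
  push_cast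
  ring

-- loop invariant: under valid bounds A's loop returns B's joins appended to the accumulators
lemma loopA_eq (b : List Int) (n : Nat) : ∀ (c : Int) (ib im : String),
    -(b.length : Int) ≤ c → c + n ≤ (b.length : Int) →
    parseXimmLoopA b n c ib im =
      some (ib ++ PySem.Str.join ""
              (((List.range n).map (fun (j : Nat) => (PySem.List.pyGet? b (c + (j : Int))).getD 0)).map fmt02x),
            PySem.Str.join ""
              ((((List.range n).map (fun (j : Nat) => (PySem.List.pyGet? b (c + (j : Int))).getD 0)).reverse).map fmt02x) ++ im,
            c + n) := by
  induction n with
  | zero => intro c ib im h1 h2; simp [parseXimmLoopA, str_join_nil]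
  | succ n ih =>
    intro c ib im h1 h2
    have hlt : c < (b.length : Int) := by push_cast at h2 ⊢; omega
    have hget : PySem.List.pyGet? b c ≠ none := by
      intro hn
      rw [PySem.List.pyGet?_eq_none_iff] at hn
      exact hn (by simp only [PySem.Raise.InRange]; omega)
    obtain ⟨v, hv⟩ := Option.ne_none_iff_exists'.mp hget
    rw [chunk_succ]
    have : parseXimmLoopA b (n + 1) c ib im =
        parseXimmLoopA b n (c + 1) (ib ++ fmt02x v) (fmt02x v ++ im) := by
      simp [parseXimmLoopA, not_le.mpr hlt, hv, PySem.List.len]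
    rw [this, ih (c + 1) _ _ (by omega) (by push_cast at h2 ⊢; omega)]
    simp only [hv, Option.getD_some, List.map_cons, List.reverse_cons, List.map_append,
      str_join_nil, List.flatten_cons, List.flatten_append, Option.some.injEq, Prod.mk.injEq]
    refine ⟨?_, ?_, by push_cast; ring⟩
    · simp [← String.append_assoc]
    · simp [String.append_assoc]

-- ===== VERDICT (by name: the statement is the Claim_ definition above) =====
theorem parseXimm_spec : Claim_equal_parseXimm := by
  intro X counter b _ hpre
  unfold Spec_parseXimm parseXimm parseXimm_alt
  set k := PySem.Int.floordiv X 8 with hk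
  rcases le_or_gt k 0 with hle | hpos
  · have h0 : k.toNat = 0 := Int.toNat_of_nonpos hle
    have hm : max k 0 = 0 := by omega
    simp [h0, hm, parseXimmLoopA, str_join_nil]
  · rcases hpre with h | ⟨h1, h2⟩
    · omega
    · have hm : max k 0 = k := by omega
      have hcast : (k.toNat : Int) = k := Int.toNat_of_nonneg (le_of_lt hpos)
      rw [loopA_eq b k.toNat counter "" "" h1 (by rw [hcast]; exact h2)]
      simp [hm, hcast]
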